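-- pv_equiv track=rewrite | github.com/ethanbabel/1Inch_CryptoTrading | arb_detector.py | extract_arbitrage_cycle
-- ===== SOURCE A (Python) =====
-- def extract_arbitrage_cycle(predecessors, start):
--     """Extracts an arbitrage cycle from the Bellman-Ford results."""
--     cycle = []
--     visited = set()
--     while start not in visited:
--         visited.add(start)
--         start = predecessors[start]
--     cycle_start = start
--     while True:
--         cycle.append(start)
--         start = predecessors[start]
--         if start == cycle_start:
--             break
--     cycle.append(cycle_start)
--     cycle.reverse()
--     return cycle
-- ===== SOURCE B (Python) =====
-- def extract_arbitrage_cycle(predecessors, start):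
--     """Extracts an arbitrage cycle from the Bellman-Ford results."""
--     path = []
--     index = {}
--     while start not in index:
--         index[start] = len(path)
--         path.append(start)
--         start = predecessors[start]
--     cyc = path[index[start]:]
--     cyc.reverse()
--     return [start] + cyc
-- ===== Notes on version B (the rewrite author's own statement) =====
-- stated objective: alternative
-- what changed: A walks until a node repeats using a visited set and then RE-WALKS the cycle in a second loop; B records the walked path together with each node's position in one pass and extracts the cycle as a slice of that path, so the second traversal disappears.
-- outside the precondition, e.g. on extract_arbitrage_cycle({'a': 'a', 'b': 'z'}, 'a'): A returns ['a', 'a'], B returns ['a', 'a']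
import Mathlib
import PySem

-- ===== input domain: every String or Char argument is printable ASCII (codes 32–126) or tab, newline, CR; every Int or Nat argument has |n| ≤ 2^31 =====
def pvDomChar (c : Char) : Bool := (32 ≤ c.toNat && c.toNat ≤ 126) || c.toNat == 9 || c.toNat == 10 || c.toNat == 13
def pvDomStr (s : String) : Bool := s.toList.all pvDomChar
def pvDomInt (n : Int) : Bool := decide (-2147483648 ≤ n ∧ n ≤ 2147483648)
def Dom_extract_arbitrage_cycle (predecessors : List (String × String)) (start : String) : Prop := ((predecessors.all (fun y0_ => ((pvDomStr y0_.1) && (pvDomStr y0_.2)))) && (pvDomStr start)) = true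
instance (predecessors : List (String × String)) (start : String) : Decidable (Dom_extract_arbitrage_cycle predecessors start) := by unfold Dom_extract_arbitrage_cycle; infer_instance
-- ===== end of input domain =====

-- B replaces A's set-guarded walk plus a second re-walk of the cycle by ONE traversal
-- that records each node's position, then slices the cycle out of the recorded path.

-- ===== PORT A =====
-- first while loop: visited is a Python set; fuel |predecessors|+1 suffices on Pre_ (never exhausted there)
def pvWalkA (pred : PySem.Dict String String) : Nat → PySem.Set String → String → Option String
  | 0, _, _ => none
  | n+1, visited, start =>
    if PySem.Set.contains visited start then some start
    else
      match pred.get? start with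
      | none => none                                  -- KeyError in Python, excluded by Pre_
      | some nxt => pvWalkA pred n (PySem.Set.add visited start) nxt

-- second while loop (do-while collecting the cycle); same fuel argument
def pvCollectA (pred : PySem.Dict String String) (cstart : String) : Nat → String → List String → Option (List String)
  | 0, _, _ => none
  | n+1, start, cycle =>
    let cycle' := cycle ++ [start]
    match pred.get? start with
    | none => none                                    -- KeyError in Python, excluded by Pre_
    | some nxt => if nxt == cstart then some cycle' else pvCollectA pred cstart n nxt cycle'

def extract_arbitrage_cycle (predecessors : List (String × String)) (start : String) : List String :=
  match pvWalkA (PySem.Dict.mk predecessors) (predecessors.length + 1) PySem.Set.empty start with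
  | none => []
  | some c =>
    match pvCollectA (PySem.Dict.mk predecessors) c (predecessors.length + 1) c [] with
    | none => []
    | some cycle => (cycle ++ [c]).reverse

-- ===== PORT B =====
-- single while loop of Source B: path of walked nodes + index dict node ↦ position;
-- at exit it looks up index[start] (always present at exit, matching Python's index[start])
def pvWalkB (pred : PySem.Dict String String) : Nat → List String → PySem.Dict String Nat → String → Option (List String × String × Nat)
  | 0, _, _, _ => none
  | n+1, path, index, start =>
    match index.get? start with
    | some j => some (path, start, j)
    | none =>
      match pred.get? start with
      | none => none                                  -- KeyError in Python, excluded by Pre_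
      | some nxt => pvWalkB pred n (path ++ [start]) (index.insert start path.length) nxt

def extract_arbitrage_cycle_alt (predecessors : List (String × String)) (start : String) : List String :=
  match pvWalkB (PySem.Dict.mk predecessors) (predecessors.length + 1) [] PySem.Dict.empty start with
  | none => []
  | some (path, c, j) => c :: (path.drop j).reverse   -- [start] + reversed(path[index[start]:]); drop j is xs[j:] for 0 ≤ j

-- ===== PRECONDITION & SPEC =====
-- Pre_: start is a key and every stored predecessor value is itself a key — the natural closed-form
-- closure condition under which the walk can never hit a missing key (where Python raises KeyError).
-- It also excludes some inputs whose particular walk happens to avoid a dangling entry; on those A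
-- and B agree (B walks the same nodes and raises/returns exactly as A does).
def Pre_extract_arbitrage_cycle (predecessors : List (String × String)) (start : String) : Prop :=
  start ∈ predecessors.map Prod.fst ∧ ∀ p ∈ predecessors, p.2 ∈ predecessors.map Prod.fst
instance (predecessors : List (String × String)) (start : String) : Decidable (Pre_extract_arbitrage_cycle predecessors start) := by unfold Pre_extract_arbitrage_cycle; infer_instance

def pvWitness_extract_arbitrage_cycle : (List (String × String)) × String :=
  ([("a", "b"), ("b", "c"), ("c", "b")], "a")

def Spec_extract_arbitrage_cycle (predecessors : List (String × String)) (start : String) (out : List String) : Prop := out = extract_arbitrage_cycle_alt predecessors start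
instance (predecessors : List (String × String)) (start : String) (out : List String) : Decidable (Spec_extract_arbitrage_cycle predecessors start out) := by unfold Spec_extract_arbitrage_cycle; infer_instance

-- ===== CLAIM (what is proved, stated in full; the proofs are below) =====
def Claim_equal_extract_arbitrage_cycle : Prop := ∀ (predecessors : List (String × String)) (start : String), Dom_extract_arbitrage_cycle predecessors start → Pre_extract_arbitrage_cycle predecessors start → Spec_extract_arbitrage_cycle predecessors start (extract_arbitrage_cycle predecessors start)


-- ===== LEMMAS AND PROOFS =====

-- membership in a Python set after add (specific Bool shape used by the loop invariant)
theorem pv_contains_add (s : PySem.Set String) (a x : String) :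
    PySem.Set.contains (PySem.Set.add s a) x = (x == a || PySem.Set.contains s x) := by
  simp only [PySem.Set.add, PySem.Set.contains]
  split_ifs with h
  · by_cases hx : x = a <;> simp_all
  · by_cases hx : x = a <;> simp [hx]

-- a duplicate-free list of keys of `pred` is no longer than the dict
theorem pv_len_le (pred : PySem.Dict String String) (path : List String) (hnd : path.Nodup)
    (hsub : ∀ x ∈ path, (pred.get? x).isSome = true) : path.length ≤ pred.size := by
  have hsub' : path ⊆ pred.keys := by
    intro x hx
    by_contra hk
    have := (PySem.Dict.get?_eq_none_iff_not_mem_keys pred x).mpr hk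
    have h2 := hsub x hx
    rw [this] at h2
    simp at h2
  calc path.length ≤ pred.keys.length := (hnd.subperm hsub').length_le
    _ = pred.size := by simp [PySem.Dict.keys, PySem.Dict.size]

-- the two first-phase loops run in lockstep: A's visited set and B's index dict hold the
-- same nodes, B's path records the walk, and both exit at the same cycle-entry node
theorem pv_walk_sync (pred : PySem.Dict String String)
    (hcl : ∀ x y, pred.get? x = some y → (pred.get? y).isSome = true) :
    ∀ (n : Nat) (path : List String) (index : PySem.Dict String Nat) (visited : PySem.Set String)
      (cur : String),
    (pred.get? cur).isSome = true →
    (∀ x, PySem.Set.contains visited x = (index.get? x).isSome) →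
    (∀ x, (index.get? x).isSome = true ↔ x ∈ path) →
    (∀ x j, index.get? x = some j → path[j]? = some x) →
    path.Nodup →
    (∀ x ∈ path, (pred.get? x).isSome = true) →
    List.IsChain (fun a b => pred.get? a = some b) (path ++ [cur]) →
    pred.size + 1 ≤ n + path.length →
    ∃ path' j c, pvWalkB pred n path index cur = some (path', c, j) ∧
      pvWalkA pred n visited cur = some c ∧
      path'[j]? = some c ∧ path'.Nodup ∧
      (∀ x ∈ path', (pred.get? x).isSome = true) ∧
      List.IsChain (fun a b => pred.get? a = some b) (path' ++ [c]) := by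
  intro n
  induction n with
  | zero =>
    intro path index visited cur hcur hvis hmem hidx hnd hsub hch hn
    exfalso
    have := pv_len_le pred path hnd hsub
    omega
  | succ n ih =>
    intro path index visited cur hcur hvis hmem hidx hnd hsub hch hn
    cases h : index.get? cur with
    | some jj =>
      have hcT : cur ∈ visited := by
        have := hvis cur
        rw [h] at this
        simpa [PySem.Set.contains] using this
      refine ⟨path, jj, cur, ?_, ?_, hidx cur jj h, hnd, hsub, hch⟩
      · simp [pvWalkB, h]
      · simp [pvWalkA, PySem.Set.contains, hcT]
    | none =>
      have hcF : cur ∉ visited := by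
        have := hvis cur
        rw [h] at this
        simpa [PySem.Set.contains] using this
      have hcurnot : cur ∉ path := by
        intro hm
        have := (hmem cur).mpr hm
        rw [h] at this
        simp at this
      obtain ⟨nxt, hnx⟩ := Option.isSome_iff_exists.mp hcur
      have hB : pvWalkB pred (n+1) path index cur
          = pvWalkB pred n (path ++ [cur]) (index.insert cur path.length) nxt := by
        simp [pvWalkB, h, hnx]
      have hA : pvWalkA pred (n+1) visited cur
          = pvWalkA pred n (PySem.Set.add visited cur) nxt := by
        simp [pvWalkA, PySem.Set.contains, hcF, hnx]
      rw [hB, hA]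
      apply ih
      · exact hcl cur nxt hnx
      · intro x
        rw [pv_contains_add, PySem.Dict.get?_insert]
        have hv : decide (x ∈ visited) = (index.get? x).isSome := by
          simpa [PySem.Set.contains] using hvis x
        by_cases hx : x = cur <;> simp [hx, hv]
      · intro x
        rw [PySem.Dict.get?_insert]
        by_cases hx : x = cur <;> simp [hx, hmem x]
      · intro x k hk
        rw [PySem.Dict.get?_insert] at hk
        by_cases hx : x = cur
        · subst hx
          simp at hk
          subst hk
          exact List.getElem?_concat_length
        · simp [hx] at hk
          have hkk := hidx x k hk
          have hklt : k < path.length := (List.getElem?_eq_some_iff.mp hkk).1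
          rw [List.getElem?_append_left hklt]
          exact hkk
      · refine List.Nodup.append hnd (List.nodup_singleton _) ?_
        intro a ha hb
        rw [List.mem_singleton] at hb
        exact hcurnot (hb ▸ ha)
      · intro x hx
        rcases List.mem_append.mp hx with hx | hx
        · exact hsub x hx
        · simp at hx
          subst hx
          exact hcur
      · rw [List.isChain_append]
        refine ⟨hch, List.IsChain.singleton _, ?_⟩
        intro a ha b hb
        simp at ha
        simp at hb
        subst ha; subst hb
        exact hnx
      · simp only [List.length_append, List.length_cons, List.length_nil]
        omega

-- A's second loop walked along a chain ending back at `c` collects exactly that chain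
theorem pv_collect (pred : PySem.Dict String String) (c : String) :
    ∀ (rest : List String) (n : Nat) (s : String) (acc : List String),
    List.IsChain (fun a b => pred.get? a = some b) (s :: (rest ++ [c])) →
    c ∉ rest →
    rest.length + 1 ≤ n →
    pvCollectA pred c n s acc = some (acc ++ s :: rest) := by
  intro rest
  induction rest with
  | nil =>
    intro n s acc hch _ hn
    obtain ⟨m, rfl⟩ : ∃ m, n = m + 1 := ⟨n - 1, by omega⟩
    have hsc : pred.get? s = some c := (List.isChain_cons_cons.mp hch).1
    simp [pvCollectA, hsc]
  | cons t rest' ih =>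
    intro n s acc hch hcn hn
    obtain ⟨m, rfl⟩ : ∃ m, n = m + 1 := ⟨n - 1, by omega⟩
    have hst : pred.get? s = some t := (List.isChain_cons_cons.mp hch).1
    have htc : t ≠ c := by
      intro hh
      exact hcn (by simp [hh])
    have htcb : (t == c) = false := by simp [htc]
    have hrec := ih m t (acc ++ [s]) (by simpa using (List.isChain_cons_cons.mp hch).2)
      (fun hm => hcn (List.mem_cons_of_mem _ hm)) (by simp at hn ⊢; omega)
    simp only [pvCollectA, hst, htcb]
    simp only [Bool.false_eq_true, if_false]
    rw [hrec]
    simp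


-- ===== VERDICT (by name: the statement is the Claim_ definition above) =====
theorem extract_arbitrage_cycle_spec : Claim_equal_extract_arbitrage_cycle := by
  intro predecessors start _ hpre
  obtain ⟨hs, hclosed⟩ := hpre
  show extract_arbitrage_cycle predecessors start = extract_arbitrage_cycle_alt predecessors start
  have hkeys : (PySem.Dict.mk predecessors).keys = predecessors.map Prod.fst :=
    PySem.Dict.keys_mk predecessors
  have hmemkey : ∀ x, x ∈ predecessors.map Prod.fst →
      ((PySem.Dict.mk predecessors).get? x).isSome = true := by
    intro x hx
    cases hxx : (PySem.Dict.mk predecessors).get? x with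
    | none =>
      rw [PySem.Dict.get?_eq_none_iff_not_mem_keys, hkeys] at hxx
      exact absurd hx hxx
    | some v => rfl
  have hitems : (PySem.Dict.mk predecessors).items = predecessors := by simp
  have hcl : ∀ x y, (PySem.Dict.mk predecessors).get? x = some y →
      ((PySem.Dict.mk predecessors).get? y).isSome = true := by
    intro x y hxy
    have hm := PySem.Dict.mem_items_of_get?_eq_some _ hxy
    rw [hitems] at hm
    exact hmemkey y (hclosed _ hm)
  have hsize : (PySem.Dict.mk predecessors).size = predecessors.length := by
    simp [PySem.Dict.size]
  obtain ⟨path', j, c, hB, hA, hjc, hnd', hsub', hch'⟩ :=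
    pv_walk_sync (PySem.Dict.mk predecessors) hcl (predecessors.length + 1) [] PySem.Dict.empty
      PySem.Set.empty start (hmemkey start hs)
      (fun x => by simp [PySem.Set.empty, PySem.Set.contains, PySem.Dict.get?_empty])
      (fun x => by simp [PySem.Dict.get?_empty])
      (fun x k hk => by rw [PySem.Dict.get?_empty] at hk; cases hk)
      List.nodup_nil (by simp) (by simp) (by simp [hsize])
  have hjlt : j < path'.length := (List.getElem?_eq_some_iff.mp hjc).1
  have hdrop : path'.drop j = c :: path'.drop (j + 1) := by
    rw [List.drop_eq_getElem_cons hjlt]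
    congr 1
    exact (List.getElem?_eq_some_iff.mp hjc).2
  have hnotin : c ∉ path'.drop (j + 1) := by
    have hnd2 : (path'.drop j).Nodup := List.Sublist.nodup (List.drop_sublist j path') hnd'
    rw [hdrop] at hnd2
    exact (List.nodup_cons.mp hnd2).1
  have hchain2 : List.IsChain (fun a b => (PySem.Dict.mk predecessors).get? a = some b)
      (c :: (path'.drop (j + 1) ++ [c])) := by
    have hd := hch'.drop j
    rw [List.drop_append_of_le_length (le_of_lt hjlt), hdrop] at hd
    simpa using hd
  have hlen : (path'.drop (j + 1)).length + 1 ≤ predecessors.length + 1 := by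
    have h1 := pv_len_le (PySem.Dict.mk predecessors) path' hnd' hsub'
    rw [hsize] at h1
    simp only [List.length_drop]
    omega
  have hcol := pv_collect (PySem.Dict.mk predecessors) c (path'.drop (j + 1))
    (predecessors.length + 1) c [] hchain2 hnotin hlen
  unfold extract_arbitrage_cycle extract_arbitrage_cycle_alt
  rw [hA, hB]
  dsimp only
  rw [hcol]
  dsimp only
  rw [hdrop]
  simp [List.reverse_append]
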